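-- pv_equiv track=rewrite | github.com/Fayord/nexus_connect | api/modules/chatbtl_utils.py | remove_elements_to_limit
-- ===== SOURCE A (Python) =====
-- from typing import List, Sized, Tuple
--
-- def remove_elements_to_limit(text_lengths: Sized, limit: int) -> int:
--     total_length = sum(text_lengths)
--     if total_length <= limit:
--         return 0
--
--     current_sum = 0
--     remove_index = 0
--
--     for i, length in enumerate(text_lengths):
--         current_sum += length
--         if current_sum > limit:
--             remove_index = i
--             break
--
--     return remove_index
-- ===== SOURCE B (Python) =====
-- def remove_elements_to_limit(text_lengths, limit):
--     def solve(seg, base):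
--         # returns (sum of seg, first relative index i in seg with base + prefix_sum(i) > limit, or None)
--         if not seg:
--             return (0, None)
--         if len(seg) == 1:
--             return (seg[0], 0 if base + seg[0] > limit else None)
--         mid = len(seg) // 2
--         ls, li = solve(seg[:mid], base)
--         rs, ri = solve(seg[mid:], base + ls)
--         return (ls + rs, li if li is not None else (None if ri is None else mid + ri))
--     total, idx = solve(list(text_lengths), 0)
--     return idx if total > limit and idx is not None else 0
-- ===== Notes on version B (the rewrite author's own statement) =====
-- stated objective: alternative
-- what changed: B computes the answer by divide and conquer: it recursively splits the list in half and combines (segment sum, first crossing index) pairs, instead of A's sum() pass followed by a linear prefix-sum scan with break.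
import Mathlib
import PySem

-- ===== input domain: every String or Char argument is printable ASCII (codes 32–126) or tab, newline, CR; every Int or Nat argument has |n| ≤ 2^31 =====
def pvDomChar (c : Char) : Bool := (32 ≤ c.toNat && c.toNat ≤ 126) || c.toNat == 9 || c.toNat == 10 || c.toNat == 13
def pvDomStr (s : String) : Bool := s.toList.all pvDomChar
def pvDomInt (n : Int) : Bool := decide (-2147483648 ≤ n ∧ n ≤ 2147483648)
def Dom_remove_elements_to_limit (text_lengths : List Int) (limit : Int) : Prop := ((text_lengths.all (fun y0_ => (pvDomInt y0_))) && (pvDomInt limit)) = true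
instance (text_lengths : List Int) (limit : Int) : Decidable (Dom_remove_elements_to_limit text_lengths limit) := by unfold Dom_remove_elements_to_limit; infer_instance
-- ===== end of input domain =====

-- B replaces A's linear prefix-sum scan by a divide-and-conquer that recursively combines
-- (segment sum, first crossing index) pairs over halves (objective: alternative).


-- ===== PORT A =====
-- the for-loop of A: current_sum accumulates, break returns i, loop exhaustion returns remove_index = 0
def pvAScan (limit : Int) : List Int → Int → Int → Int
  | [], _, _ => 0
  | l :: rest, cs, i => if limit < cs + l then i else pvAScan limit rest (cs + l) (i + 1)

def remove_elements_to_limit (text_lengths : List Int) (limit : Int) : Int :=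
  let total_length := text_lengths.foldl (· + ·) 0
  if total_length ≤ limit then 0
  else pvAScan limit text_lengths 0 0

-- ===== PORT B =====
-- B's divide-and-conquer helper 'solve': (segment sum, first relative crossing index or None)
def pvSolve (limit : Int) : List Int → Int → Int × Option Int
  | [], _ => (0, none)
  | [l], base => (l, if limit < base + l then some 0 else none)
  | a :: b :: rest, base =>
      let seg := a :: b :: rest
      let mid := seg.length / 2
      let p := pvSolve limit (seg.take mid) base
      let q := pvSolve limit (seg.drop mid) (base + p.1)
      (p.1 + q.1,
        match p.2 with
        | some li => some li
        | none => match q.2 with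
          | none => none
          | some ri => some ((mid : Int) + ri))
termination_by seg _ => seg.length
decreasing_by all_goals simp [List.length_take, List.length_drop]; omega

def remove_elements_to_limit_alt (text_lengths : List Int) (limit : Int) : Int :=
  let r := pvSolve limit text_lengths 0
  if limit < r.1 ∧ r.2 ≠ none then r.2.getD 0 else 0

-- ===== PRECONDITION & SPEC =====
def Spec_remove_elements_to_limit (text_lengths : List Int) (limit : Int) (out : Int) : Prop := out = remove_elements_to_limit_alt text_lengths limit
instance (text_lengths : List Int) (limit : Int) (out : Int) : Decidable (Spec_remove_elements_to_limit text_lengths limit out) := by unfold Spec_remove_elements_to_limit; infer_instance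

-- ===== CLAIM (what is proved, stated in full; the proofs are below) =====
def Claim_equal_remove_elements_to_limit : Prop := ∀ (text_lengths : List Int) (limit : Int), Dom_remove_elements_to_limit text_lengths limit → Spec_remove_elements_to_limit text_lengths limit (remove_elements_to_limit text_lengths limit)

-- ===== LEMMAS AND PROOFS =====
-- specification scan: first relative index whose prefix sum (from base) exceeds limit
def pvFirst (limit : Int) : List Int → Int → Option Int
  | [], _ => none
  | l :: rest, base =>
      if limit < base + l then some 0 else (pvFirst limit rest (base + l)).map (· + 1)

theorem pvFirst_append (limit : Int) (u v : List Int) (base : Int) :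
    pvFirst limit (u ++ v) base =
      match pvFirst limit u base with
      | some j => some j
      | none => (pvFirst limit v (base + u.sum)).map (· + (u.length : Int)) := by
  induction u generalizing base with
  | nil => simp [pvFirst]
  | cons l rest ih =>
    simp only [List.cons_append, pvFirst]
    by_cases h : limit < base + l
    · simp [h]
    · rw [if_neg h, if_neg h, ih]
      cases hf : pvFirst limit rest (base + l) with
      | some j => simp
      | none =>
        simp only [Option.map_none, Option.map_map, List.sum_cons, List.length_cons]
        have hb : base + l + rest.sum = base + (l + rest.sum) := by ring
        rw [hb]
        cases pvFirst limit v (base + (l + rest.sum)) with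
        | none => simp
        | some j =>
          simp only [Option.map_some, Function.comp]
          congr 1
          push_cast
          ring

theorem pvSolve_eq_aux (limit : Int) (n : Nat) :
    ∀ (seg : List Int), seg.length ≤ n → ∀ (base : Int),
    pvSolve limit seg base = (seg.sum, pvFirst limit seg base) := by
  induction n with
  | zero =>
    intro seg hlen base
    cases seg with
    | nil => simp [pvSolve, pvFirst]
    | cons a t => simp at hlen
  | succ n ih =>
    intro seg hlen base
    match seg with
    | [] => simp [pvSolve, pvFirst]
    | [l] => simp [pvSolve, pvFirst]
    | a :: b :: rest =>
    rw [pvSolve]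
    have hlt : 1 ≤ (a :: b :: rest).length / 2 ∧ (a :: b :: rest).length / 2 < (a :: b :: rest).length := by
      simp; omega
    have hlen1 : ((a :: b :: rest).take ((a :: b :: rest).length / 2)).length ≤ n := by
      simp only [List.length_take]
      simp at hlen ⊢; omega
    have hlen2 : ((a :: b :: rest).drop ((a :: b :: rest).length / 2)).length ≤ n := by
      simp only [List.length_drop]
      simp at hlen ⊢; omega
    rw [ih _ hlen1, ih _ hlen2]
    have hml : (a :: b :: rest).length / 2 ≤ (a :: b :: rest).length := Nat.div_le_self _ _
    have htl : ((a :: b :: rest).take ((a :: b :: rest).length / 2)).length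
        = (a :: b :: rest).length / 2 := by simp [List.length_take]; omega
    have h1 : ((a :: b :: rest).take ((a :: b :: rest).length / 2)).sum
        + ((a :: b :: rest).drop ((a :: b :: rest).length / 2)).sum = (a :: b :: rest).sum := by
      conv_rhs => rw [← List.take_append_drop ((a :: b :: rest).length / 2) (a :: b :: rest)]
      rw [List.sum_append]
    have h2 : pvFirst limit (a :: b :: rest) base
        = match pvFirst limit ((a :: b :: rest).take ((a :: b :: rest).length / 2)) base with
          | some j => some j
          | none => (pvFirst limit ((a :: b :: rest).drop ((a :: b :: rest).length / 2))
              (base + ((a :: b :: rest).take ((a :: b :: rest).length / 2)).sum)).map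
              (· + (((a :: b :: rest).length / 2 : Nat) : Int)) := by
      conv_lhs => rw [← List.take_append_drop ((a :: b :: rest).length / 2) (a :: b :: rest)]
      rw [pvFirst_append, htl]
    rw [Prod.mk.injEq]
    refine ⟨h1, ?_⟩
    rw [h2]
    cases pvFirst limit ((a :: b :: rest).take ((a :: b :: rest).length / 2)) base with
    | some j => rfl
    | none =>
      cases pvFirst limit ((a :: b :: rest).drop ((a :: b :: rest).length / 2))
          (base + ((a :: b :: rest).take ((a :: b :: rest).length / 2)).sum) with
      | none => rfl
      | some ri => simp [add_comm]

theorem pvSolve_eq (limit : Int) (seg : List Int) (base : Int) :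
    pvSolve limit seg base = (seg.sum, pvFirst limit seg base) :=
  pvSolve_eq_aux limit seg.length seg le_rfl base

theorem pvAScan_eq (limit : Int) (xs : List Int) (cs i : Int) :
    pvAScan limit xs cs i = match pvFirst limit xs cs with
      | some j => i + j
      | none => 0 := by
  induction xs generalizing cs i with
  | nil => rfl
  | cons l rest ih =>
    simp only [pvAScan, pvFirst]
    by_cases h : limit < cs + l
    · simp [h]
    · rw [if_neg h, if_neg h, ih]
      cases pvFirst limit rest (cs + l) with
      | none => simp
      | some j => simp; ring

-- ===== VERDICT (by name: the statement is the Claim_ definition above) =====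
theorem remove_elements_to_limit_spec : Claim_equal_remove_elements_to_limit := by
  intro xs limit _
  unfold Spec_remove_elements_to_limit remove_elements_to_limit remove_elements_to_limit_alt
  rw [pvSolve_eq]
  have hsum : xs.foldl (· + ·) 0 = xs.sum := by
    rw [List.sum_eq_foldl]
  by_cases htot : xs.sum ≤ limit
  · rw [hsum, if_pos htot]
    have : ¬ (limit < xs.sum ∧ (pvFirst limit xs 0) ≠ none) := fun hx => absurd htot (not_le.mpr hx.1)
    simp [this]
  · rw [hsum, if_neg htot, pvAScan_eq]
    have hlt : limit < xs.sum := not_le.mp htot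
    cases hf : pvFirst limit xs 0 with
    | none => simp [hlt]
    | some j => simp [hlt]
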